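-- pv_equiv track=rewrite | github.com/kamisei/fio-cleaner | src/domain/fio/normalize_value.py | _title_case_outside_parentheses
-- ===== SOURCE A (Python) =====
-- def _title_case_token_part(part: str) -> str:
--     if not part:
--         return part
--     return part[:1].upper() + part[1:].lower()
--
-- def _title_case_outside_parentheses(s: str) -> str:
--     """
--     Title-case only outside of круглых скобок.
--
--     Content inside (...) is preserved exactly as-is to avoid changing meaning
--     (e.g., maiden name, comments).
--
--     Important: spaces are preserved exactly (spaces were already normalized earlier).
--     """
--     if s == "":
--         return s
--
--     out: list[str] = []
--     i = 0
--     n = len(s)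
--
--     def flush_word(buf: list[str]) -> None:
--         if not buf:
--             return
--         word = "".join(buf)
--         parts = word.split("-")
--         parts = [_title_case_token_part(part) for part in parts]
--         out.append("-".join(parts))
--         buf.clear()
--
--     word_buf: list[str] = []
--
--     while i < n:
--         ch = s[i]
--
--         if ch == "(":
--             # Finish any pending word, then copy protected segment verbatim.
--             flush_word(word_buf)
--             j = i + 1
--             depth = 1
--             while j < n and depth > 0:
--                 if s[j] == "(":
--                     depth += 1
--                 elif s[j] == ")":
--                     depth -= 1
--                 j += 1
--             out.append(s[i:j])
--             i = j
--             continue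
--
--         if ch == " ":
--             flush_word(word_buf)
--             out.append(" ")
--             i += 1
--             continue
--
--         # build word (letters/digits/other symbols) until space or '('
--         word_buf.append(ch)
--         i += 1
--
--     flush_word(word_buf)
--     return "".join(out)
-- ===== SOURCE B (Python) =====
-- def _title_case_outside_parentheses(s: str) -> str:
--     # Single-pass character state machine: a paren-nesting depth counter plus a
--     # "start of hyphen-part" flag replace A's word buffer / flush machinery.
--     out = []
--     depth = 0
--     start = True
--     for ch in s:
--         if depth > 0:
--             out.append(ch)
--             if ch == "(":
--                 depth += 1
--             elif ch == ")":
--                 depth -= 1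
--         elif ch == "(":
--             out.append(ch)
--             depth = 1
--             start = True
--         elif ch == " ":
--             out.append(ch)
--             start = True
--         elif ch == "-":
--             out.append(ch)
--             start = True
--         else:
--             out.append(ch.upper() if start else ch.lower())
--             start = False
--     return "".join(out)
-- ===== Notes on version B (the rewrite author's own statement) =====
-- stated objective: alternative
-- what changed: A buffers word characters and flushes them through split-on-dash / title-part / join machinery with a nested balanced-paren scan; B is a single left-to-right character state machine carrying only a paren-depth counter and a start-of-part flag, emitting each output character immediately (no word buffer, no split/join, no nested scan).
import Mathlib
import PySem

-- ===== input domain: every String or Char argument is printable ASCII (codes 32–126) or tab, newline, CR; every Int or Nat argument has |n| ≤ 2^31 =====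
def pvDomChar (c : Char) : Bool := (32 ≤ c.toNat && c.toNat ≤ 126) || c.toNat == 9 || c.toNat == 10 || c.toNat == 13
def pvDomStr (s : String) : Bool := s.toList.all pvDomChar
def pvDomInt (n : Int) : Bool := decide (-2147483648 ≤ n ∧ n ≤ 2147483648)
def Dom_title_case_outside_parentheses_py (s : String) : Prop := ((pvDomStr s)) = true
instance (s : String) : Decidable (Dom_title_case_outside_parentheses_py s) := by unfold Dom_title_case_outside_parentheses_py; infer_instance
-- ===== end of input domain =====

-- B replaces A's word-buffer/flush (split-on-dash, title, join) machinery and nested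
-- balanced-paren scan by a single-pass character state machine (depth counter + start flag).

-- ===== PORT A =====
-- _title_case_token_part
def pvTitlePartA (p : List Char) : List Char :=
  match p with
  | [] => []
  | c :: cs => PySem.Chars.upperChar c :: cs.map PySem.Chars.lowerChar

-- flush_word: "".join(buf).split("-") title-cased and re-joined with "-"
def pvFlushA (buf : List Char) : List (List Char) :=
  if buf = [] then []
  else [PySem.Chars.join ['-'] ((buf.splitOn '-').map pvTitlePartA)]

-- the inner 'while j < n and depth > 0' scan; returns (consumed chars, remainder)
def pvParenA : List Char → Nat → List Char × List Char
  | [], _ => ([], [])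
  | c :: r, depth =>
    let d := if c = '(' then depth + 1 else if c = ')' then depth - 1 else depth
    if d = 0 then ([c], r)
    else
      let p := pvParenA r d
      (c :: p.1, p.2)

-- termination helper for the main loop (the paren scan consumes a prefix)
theorem pvParenA_len : ∀ (r : List Char) (d : Nat), (pvParenA r d).2.length ≤ r.length
  | [], _ => Nat.le_refl _
  | c :: r, depth => by
    simp only [pvParenA]
    by_cases h : (if c = '(' then depth + 1 else if c = ')' then depth - 1 else depth) = 0
    · rw [if_pos h]; simp
    · rw [if_neg h]; exact Nat.le_succ_of_le (pvParenA_len r _)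

-- the main 'while i < n' loop of A, state = (rest of s, word_buf, out)
def pvLoopA : List Char → List Char → List (List Char) → List (List Char)
  | [], buf, out => out ++ pvFlushA buf
  | c :: rest, buf, out =>
    if c = '(' then
      pvLoopA (pvParenA rest 1).2 [] (out ++ pvFlushA buf ++ [c :: (pvParenA rest 1).1])
    else if c = ' ' then
      pvLoopA rest [] (out ++ pvFlushA buf ++ [[' ']])
    else
      pvLoopA rest (buf ++ [c]) out
  termination_by cs _ _ => cs.length
  decreasing_by
  · exact Nat.lt_succ_of_le (pvParenA_len rest 1)
  · simp
  · simp

def title_case_outside_parentheses_py (s : String) : String :=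
  if s = "" then s else String.ofList (pvLoopA s.toList [] []).flatten

-- ===== PORT B =====
-- Source B's for-loop over the characters; state = (paren depth, start-of-part flag);
-- the output list is append-only, so it is produced head-first by the recursion.
def pvLoopB : List Char → Nat → Bool → List Char
  | [], _, _ => []
  | c :: r, depth, start =>
    if depth > 0 then
      c :: pvLoopB r (if c = '(' then depth + 1 else if c = ')' then depth - 1 else depth) start
    else if c = '(' then
      c :: pvLoopB r 1 true
    else if c = ' ' then
      c :: pvLoopB r 0 true
    else if c = '-' then
      c :: pvLoopB r 0 true
    else
      (if start then PySem.Chars.upperChar c else PySem.Chars.lowerChar c) :: pvLoopB r 0 false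

def title_case_outside_parentheses_py_alt (s : String) : String :=
  String.ofList (pvLoopB s.toList 0 true)

-- ===== PRECONDITION & SPEC =====
def Spec_title_case_outside_parentheses_py (s : String) (out : String) : Prop := out = title_case_outside_parentheses_py_alt s
instance (s : String) (out : String) : Decidable (Spec_title_case_outside_parentheses_py s out) := by unfold Spec_title_case_outside_parentheses_py; infer_instance

-- ===== CLAIM (what is proved, stated in full; the proofs are below) =====
def Claim_equal_title_case_outside_parentheses_py : Prop := ∀ (s : String), Dom_title_case_outside_parentheses_py s → Spec_title_case_outside_parentheses_py s (title_case_outside_parentheses_py s)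

-- ===== LEMMAS AND PROOFS =====

-- B's start flag after consuming a word prefix, starting from flag st
def pvStartFrom : List Char → Bool → Bool
  | [], st => st
  | c :: r, _ => pvStartFrom r (decide (c = '-'))

-- B's rendering of a pure word chunk (what pvLoopB does between spaces/parens)
def pvWordB : List Char → Bool → List Char
  | [], _ => []
  | c :: r, st =>
    (if c = '-' then '-' else if st then PySem.Chars.upperChar c else PySem.Chars.lowerChar c)
      :: pvWordB r (decide (c = '-'))

theorem pvStartFrom_snoc (buf : List Char) (st : Bool) (c : Char) :
    pvStartFrom (buf ++ [c]) st = decide (c = '-') := by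
  induction buf generalizing st with
  | nil => rfl
  | cons a r ih => simpa [pvStartFrom] using ih _

theorem pvWordB_snoc (buf : List Char) (st : Bool) (c : Char) :
    pvWordB (buf ++ [c]) st =
      pvWordB buf st ++
        [if c = '-' then '-'
         else if pvStartFrom buf st then PySem.Chars.upperChar c else PySem.Chars.lowerChar c] := by
  induction buf generalizing st with
  | nil => rfl
  | cons a r ih =>
    simp only [List.cons_append, pvWordB, pvStartFrom, ih]
    rfl

-- join with "-" as a flatMap
theorem pvJoin_dash (a : List Char) (ps : List (List Char)) :
    PySem.Chars.join ['-'] (a :: ps) = a ++ ps.flatMap (fun q => '-' :: q) := by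
  induction ps generalizing a with
  | nil => simp [PySem.Chars.join_singleton]
  | cons b l ih => simp [PySem.Chars.join_cons_cons, ih]

-- splitOn-based closed forms of pvWordB in both flag states
theorem pvWordB_splitOn : ∀ l : List Char,
    (pvWordB l true =
      (match l.splitOn '-' with
       | [] => []
       | p :: ps => pvTitlePartA p ++ ps.flatMap (fun q => '-' :: pvTitlePartA q))) ∧
    (pvWordB l false =
      (match l.splitOn '-' with
       | [] => []
       | p :: ps => p.map PySem.Chars.lowerChar ++ ps.flatMap (fun q => '-' :: pvTitlePartA q)))
  | [] => by
    constructor <;> simp [pvWordB, List.splitOn, List.splitOnP_nil, pvTitlePartA]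
  | c :: r => by
    obtain ⟨p, ps, hr⟩ : ∃ p ps, r.splitOn '-' = p :: ps := by
      cases h : r.splitOn '-' with
      | nil => exact absurd h (List.splitOnP_ne_nil _ _)
      | cons p ps => exact ⟨p, ps, rfl⟩
    obtain ⟨ih1, ih2⟩ := pvWordB_splitOn r
    by_cases hc : c = '-'
    · subst hc
      have hsplit : ('-' :: r).splitOn '-' = [] :: r.splitOn '-' := by
        simp [List.splitOn, List.splitOnP_cons]
      rw [hsplit, hr] at *
      constructor <;>
        simp [pvWordB, ih1, pvTitlePartA]
    · have hsplit : (c :: r).splitOn '-' = (c :: p) :: ps := by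
        simp only [List.splitOn, List.splitOnP_cons] at *
        rw [if_neg (by simpa using hc)]
        rw [show r.splitOnP (fun x => x == '-') = p :: ps from hr]
        rfl
      rw [hsplit]
      constructor <;>
        simp [pvWordB, hc, ih2, hr, pvTitlePartA]

-- A's flush of a word buffer is exactly B's word rendering from a fresh start
theorem pvFlush_eq_wordB (buf : List Char) :
    (pvFlushA buf).flatten = pvWordB buf true := by
  unfold pvFlushA
  split
  · subst ‹buf = []›; rfl
  · obtain ⟨p, ps, hb⟩ : ∃ p ps, buf.splitOn '-' = p :: ps := by
      cases h : buf.splitOn '-' with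
      | nil => exact absurd h (List.splitOnP_ne_nil _ _)
      | cons p ps => exact ⟨p, ps, rfl⟩
    rw [(pvWordB_splitOn buf).1, hb]
    simp [pvJoin_dash, List.flatMap_map]

-- inside a protected region B copies verbatim exactly what A's paren scan consumes
theorem pvLoopB_paren : ∀ (r : List Char) (d : Nat), 0 < d →
    pvLoopB r d true = (pvParenA r d).1 ++ pvLoopB (pvParenA r d).2 0 true
  | [], d, _ => by simp [pvLoopB, pvParenA]
  | c :: r, d, hd => by
    rw [pvLoopB, if_pos hd]
    simp only [pvParenA]
    by_cases h : (if c = '(' then d + 1 else if c = ')' then d - 1 else d) = 0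
    · rw [if_pos h, h]; rfl
    · rw [if_neg h]
      rw [pvLoopB_paren r _ (Nat.pos_of_ne_zero h)]
      simp

theorem pvLoopA_out : ∀ (cs buf : List Char) (out : List (List Char)),
    pvLoopA cs buf out = out ++ pvLoopA cs buf []
  | [], buf, out => by simp [pvLoopA]
  | c :: rest, buf, out => by
    by_cases h1 : c = '('
    · rw [pvLoopA, pvLoopA, if_pos h1, if_pos h1,
        pvLoopA_out (pvParenA rest 1).2 [] (out ++ pvFlushA buf ++ _),
        pvLoopA_out (pvParenA rest 1).2 [] ([] ++ pvFlushA buf ++ _)]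
      simp
    · by_cases h2 : c = ' '
      · rw [pvLoopA, pvLoopA, if_neg h1, if_pos h2, if_neg h1, if_pos h2,
          pvLoopA_out rest [] (out ++ pvFlushA buf ++ _),
          pvLoopA_out rest [] ([] ++ pvFlushA buf ++ _)]
        simp
      · rw [pvLoopA, pvLoopA, if_neg h1, if_neg h2, if_neg h1, if_neg h2,
          pvLoopA_out rest (buf ++ [c]) out]
  termination_by cs _ _ => cs.length
  decreasing_by
  · exact Nat.lt_succ_of_le (pvParenA_len rest 1)
  · exact Nat.lt_succ_of_le (pvParenA_len rest 1)
  · simp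
  · simp
  · simp

-- the main simulation: A's loop with pending word buffer buf = B's machine,
-- with B having already emitted the rendering of buf
theorem pvMain : ∀ (cs buf : List Char),
    pvWordB buf true ++ pvLoopB cs 0 (pvStartFrom buf true) = (pvLoopA cs buf []).flatten
  | [], buf => by
    simp [pvLoopA, pvLoopB, pvFlush_eq_wordB]
  | c :: rest, buf => by
    by_cases h1 : c = '('
    · subst h1
      rw [pvLoopA, if_pos rfl, pvLoopA_out]
      rw [pvLoopB]
      rw [if_neg (by simp), if_pos rfl]
      rw [pvLoopB_paren rest 1 Nat.one_pos]
      have := pvMain (pvParenA rest 1).2 []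
      simp only [pvWordB, List.nil_append, pvStartFrom] at this
      simp [pvFlush_eq_wordB, this]
    · by_cases h2 : c = ' '
      · subst h2
        rw [pvLoopA, if_neg h1, if_pos rfl, pvLoopA_out]
        rw [pvLoopB]
        rw [if_neg (by simp), if_neg h1, if_pos rfl]
        have := pvMain rest []
        simp only [pvWordB, List.nil_append, pvStartFrom] at this
        simp [pvFlush_eq_wordB, this]
      · rw [pvLoopA, if_neg h1, if_neg h2]
        rw [← pvMain rest (buf ++ [c])]
        rw [pvWordB_snoc, pvStartFrom_snoc]
        by_cases h3 : c = '-'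
        · subst h3
          rw [pvLoopB]
          rw [if_neg (by simp), if_neg h1, if_neg h2, if_pos rfl]
          simp
        · rw [pvLoopB]
          rw [if_neg (by simp), if_neg h1, if_neg h2, if_neg h3]
          simp [h3]
  termination_by cs _ => cs.length
  decreasing_by
  · exact Nat.lt_succ_of_le (pvParenA_len rest 1)
  · simp
  · simp

-- ===== VERDICT (by name: the statement is the Claim_ definition above) =====
theorem title_case_outside_parentheses_py_spec : Claim_equal_title_case_outside_parentheses_py := by
  intro s _
  unfold Spec_title_case_outside_parentheses_py title_case_outside_parentheses_py
    title_case_outside_parentheses_py_alt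
  by_cases hs : s = ""
  · subst hs
    rw [if_pos rfl]
    rfl
  · rw [if_neg hs, ← pvMain s.toList []]
    rfl
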